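-- pv_equiv track=rewrite | github.com/mirasoth/soothe | packages/soothe/src/soothe/cognition/agent_loop/utils/stream_normalize.py | join_text_fragments
-- ===== SOURCE A (Python) =====
-- def join_text_fragments(parts: list[str]) -> str:
--     """Join text fragments while preserving common word/markdown boundaries.
--
--     LangGraph/LLM chunking can emit adjacent fragments without explicit boundary
--     characters. A plain `''.join(parts)` may collapse tokens such as `first10`
--     or markdown headings like `Report##`.
--     """
--     if not parts:
--         return ""
--     if len(parts) == 1:
--         return parts[0]
--
--     out = [parts[0]]
--     for part in parts[1:]:
--         if not part:
--             continue
--         prev = out[-1]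
--         if not prev:
--             out[-1] = part
--             continue
--
--         prev_last = prev[-1]
--         next_first = part[0]
--
--         # Keep explicit whitespace/newline boundaries untouched.
--         if prev_last.isspace() or next_first.isspace():
--             out.append(part)
--             continue
--         # Preserve markdown/code boundary before heading/list/html markers.
--         if next_first in "#<":
--             out.append("\n" + part)
--             continue
--         # Preserve human-readable token boundary for alpha<->digit transitions.
--         if (prev_last.isalpha() and next_first.isdigit()) or (
--             prev_last.isdigit() and next_first.isalpha()
--         ):
--             out.append(" " + part)
--             continue
--
--         out.append(part)
--
--     return "".join(out)
-- ===== SOURCE B (Python) =====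
-- def join_text_fragments(parts: list[str]) -> str:
--     """Sentinel-scan rewrite: join the non-empty fragments with a NUL sentinel
--     (which cannot occur in the text), then make one character-level pass over
--     the joined string, replacing each sentinel by the boundary text chosen
--     from its two neighbouring characters."""
--     s = "\x00".join(p for p in parts if p)
--     out = []
--     for i, c in enumerate(s):
--         if c == "\x00":
--             out.append(_boundary(s[i - 1], s[i + 1]))
--         else:
--             out.append(c)
--     return "".join(out)
--
--
-- def _boundary(prev_last: str, next_first: str) -> str:
--     if prev_last.isspace() or next_first.isspace():
--         return ""
--     if next_first in "#<":
--         return "\n"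
--     if (prev_last.isalpha() and next_first.isdigit()) or (
--         prev_last.isdigit() and next_first.isalpha()
--     ):
--         return " "
--     return ""
-- ===== Notes on version B (the rewrite author's own statement) =====
-- stated objective: alternative
-- what changed: B joins the non-empty fragments with a NUL sentinel character and then does one character-level scan of the joined string, replacing each sentinel by the boundary text computed from its two neighbouring characters, instead of A's fragment-level loop with out[-1] mutation.
import Mathlib
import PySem

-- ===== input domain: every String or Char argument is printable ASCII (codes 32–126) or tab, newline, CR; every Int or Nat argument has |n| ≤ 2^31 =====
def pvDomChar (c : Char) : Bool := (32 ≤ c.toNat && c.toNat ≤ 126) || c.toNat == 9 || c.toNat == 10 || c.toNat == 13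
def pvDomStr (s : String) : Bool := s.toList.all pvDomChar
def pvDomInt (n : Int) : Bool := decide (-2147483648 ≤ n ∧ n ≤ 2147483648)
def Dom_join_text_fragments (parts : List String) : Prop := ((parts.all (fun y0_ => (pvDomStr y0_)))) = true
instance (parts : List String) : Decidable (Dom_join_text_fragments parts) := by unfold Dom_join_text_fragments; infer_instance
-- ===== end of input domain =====

-- B joins the non-empty fragments with a NUL sentinel and replaces each sentinel in one
-- character-level scan by the boundary text computed from its neighbours; objective: alternative.

-- ===== PORT A =====
-- A's loop: `out` is kept in REVERSED order (head = Python's out[-1]); fragments as List Char.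
def joinA_loop (out : List (List Char)) (rest : List (List Char)) : List (List Char) :=
  match rest with
  | [] => out
  | part :: rest' =>
    if part = [] then joinA_loop out rest'
    else
      match out with
      | [] => joinA_loop [part] rest'   -- unreachable: out is never empty
      | prev :: outTail =>
        if prev = [] then joinA_loop (part :: outTail) rest'
        else
          let prev_last := prev.getLastD ' '
          let next_first := part.headD ' '
          if PySem.Chars.isspace prev_last || PySem.Chars.isspace next_first then
            joinA_loop (part :: prev :: outTail) rest'
          else if next_first = '#' ∨ next_first = '<' then
            joinA_loop (('\n' :: part) :: prev :: outTail) rest'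
          else if (PySem.Chars.isalpha prev_last && PySem.Chars.isdigit next_first)
               || (PySem.Chars.isdigit prev_last && PySem.Chars.isalpha next_first) then
            joinA_loop ((' ' :: part) :: prev :: outTail) rest'
          else
            joinA_loop (part :: prev :: outTail) rest'

def join_text_fragments (parts : List String) : String :=
  match parts.map String.toList with
  | [] => ""
  | [p] => String.ofList p
  | p :: rest => String.ofList ((joinA_loop [p] rest).reverse.flatten)

-- ===== PORT B =====
def boundary (prev_last next_first : Char) : List Char :=
  if PySem.Chars.isspace prev_last || PySem.Chars.isspace next_first then []
  else if next_first = '#' ∨ next_first = '<' then ['\n']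
  else if (PySem.Chars.isalpha prev_last && PySem.Chars.isdigit next_first)
       || (PySem.Chars.isdigit prev_last && PySem.Chars.isalpha next_first) then [' ']
  else []

-- Source B's character scan: `prev` is the character before the current position
-- (s[i-1]); a NUL sentinel is replaced by boundary(s[i-1], s[i+1]).
def scanB (prev : Char) (cs : List Char) : List Char :=
  match cs with
  | [] => []
  | c :: rest =>
    if c = '\x00' then boundary prev (rest.headD ' ') ++ scanB c rest
    else c :: scanB c rest

def join_text_fragments_alt (parts : List String) : String :=
  String.ofList (scanB ' ' (List.intercalate ['\x00'] ((parts.map String.toList).filter (· ≠ []))))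

-- ===== PRECONDITION & SPEC =====
def Spec_join_text_fragments (parts : List String) (out : String) : Prop := out = join_text_fragments_alt parts
instance (parts : List String) (out : String) : Decidable (Spec_join_text_fragments parts out) := by unfold Spec_join_text_fragments; infer_instance

-- ===== CLAIM (what is proved, stated in full; the proofs are below) =====
def Claim_equal_join_text_fragments : Prop := ∀ (parts : List String), Dom_join_text_fragments parts → Spec_join_text_fragments parts (join_text_fragments parts)

-- ===== LEMMAS AND PROOFS =====

-- the segments (separator ++ fragment) appended after an initial fragment ending in `pl`
def segs (pl : Char) (fs : List (List Char)) : List (List Char) :=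
  match fs with
  | [] => []
  | f :: fs' => (boundary pl (f.headD ' ') ++ f) :: segs (f.getLastD ' ') fs'

theorem getLastD_append_of_ne_nil (s f : List Char) (hf : f ≠ []) (d : Char) :
    (s ++ f).getLastD d = f.getLastD d := by
  cases hh : f.getLast? with
  | none => simp [List.getLast?_eq_none_iff] at hh; exact absurd hh hf
  | some a => simp [List.getLastD_eq_getLast?, List.getLast?_append_of_ne_nil _ hf, hh]

theorem getLastD_irrel (f : List Char) (hf : f ≠ []) (d d' : Char) :
    f.getLastD d = f.getLastD d' := by
  cases hh : f.getLast? with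
  | none => simp [List.getLast?_eq_none_iff] at hh; exact absurd hh hf
  | some a => simp [List.getLastD_eq_getLast?, hh]

theorem joinA_loop_eq (rest : List (List Char)) (prev : List Char) (outTail : List (List Char))
    (hp : prev ≠ []) :
    joinA_loop (prev :: outTail) rest
      = (segs (prev.getLastD ' ') (rest.filter (· ≠ []))).reverse ++ (prev :: outTail) := by
  induction rest generalizing prev outTail with
  | nil => simp [joinA_loop, segs]
  | cons part rest ih =>
    by_cases hpart : part = []
    · simp [joinA_loop, hpart, ih prev outTail hp]
    · have key : joinA_loop (prev :: outTail) (part :: rest)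
          = joinA_loop ((boundary (prev.getLastD ' ') (part.headD ' ') ++ part) :: prev :: outTail) rest := by
        simp only [joinA_loop, boundary, hpart, if_neg hp]
        split_ifs <;> simp_all
      rw [key, ih _ _ (by simp [hpart]),
        getLastD_append_of_ne_nil _ _ hpart]
      simp [segs, hpart]

-- empty initial fragment: Python replaces out[-1] by the first non-empty fragment
theorem joinA_loop_nil_start (rest : List (List Char)) :
    joinA_loop [[]] rest
      = match rest.filter (· ≠ []) with
        | [] => [([] : List Char)]
        | f :: fs => (segs (f.getLastD ' ') fs).reverse ++ [f] := by
  induction rest with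
  | nil => simp [joinA_loop]
  | cons part rest ih =>
    by_cases hpart : part = []
    · simpa [joinA_loop, hpart] using ih
    · have : joinA_loop [[]] (part :: rest) = joinA_loop [part] rest := by
        simp [joinA_loop, hpart]
      rw [this, joinA_loop_eq rest part [] hpart]
      simp [hpart]

-- scanning a sentinel-free block just copies it and updates `prev` to its last char
theorem scanB_skip (f : List Char) (hf : '\x00' ∉ f) (rest : List Char) (prev : Char) :
    scanB prev (f ++ rest) = f ++ scanB (f.getLastD prev) rest := by
  induction f generalizing prev with
  | nil => simp [List.getLastD]
  | cons c f ih =>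
    have hc : c ≠ '\x00' := fun h => hf (h ▸ List.mem_cons_self)
    simp only [List.cons_append, scanB, if_neg hc, ih (fun h => hf (List.mem_cons_of_mem _ h)), List.getLastD_cons]

theorem scanB_segs (fs : List (List Char)) (pl : Char)
    (hfs : ∀ g ∈ fs, g ≠ [] ∧ '\x00' ∉ g) :
    scanB pl (fs.flatMap (fun g => '\x00' :: g)) = (segs pl fs).flatten := by
  induction fs generalizing pl with
  | nil => simp [scanB, segs]
  | cons g fs ih =>
    obtain ⟨hg, hgm⟩ := hfs g List.mem_cons_self
    have hhead : ((g ++ fs.flatMap (fun g => '\x00' :: g)).headD ' ') = g.headD ' ' := by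
      cases g with | nil => exact absurd rfl hg | cons c g => rfl
    simp only [List.flatMap_cons, List.cons_append]
    rw [show scanB pl ('\x00' :: (g ++ List.flatMap (fun g => '\x00' :: g) fs))
        = boundary pl ((g ++ List.flatMap (fun g => '\x00' :: g) fs).headD ' ')
          ++ scanB '\x00' (g ++ List.flatMap (fun g => '\x00' :: g) fs) from by simp [scanB]]
    rw [hhead, scanB_skip g hgm _ _, getLastD_irrel g hg '\x00' ' ',
      ih _ (fun x hx => hfs x (List.mem_cons_of_mem _ hx))]
    simp [segs]

theorem intercalate_sentinel (f : List Char) (fs : List (List Char)) :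
    List.intercalate ['\x00'] (f :: fs) = f ++ fs.flatMap (fun g => '\x00' :: g) := by
  induction fs generalizing f with
  | nil => simp [List.intercalate]
  | cons g fs ih =>
    simp only [List.intercalate, List.intersperse, List.flatten_cons] at *
    simp [ih, List.flatMap_cons]

-- the value of the whole B scan, as a function of the filtered fragment list
def joined (fs : List (List Char)) : List Char :=
  match fs with
  | [] => []
  | f :: fs' => f ++ (segs (f.getLastD ' ') fs').flatten

theorem scanB_total (fs : List (List Char)) (hfs : ∀ g ∈ fs, g ≠ [] ∧ '\x00' ∉ g) :
    scanB ' ' (List.intercalate ['\x00'] fs) = joined fs := by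
  cases fs with
  | nil => simp [List.intercalate, scanB, joined]
  | cons f fs =>
    obtain ⟨hf, hfm⟩ := hfs f List.mem_cons_self
    rw [intercalate_sentinel, scanB_skip f hfm _ _,
      scanB_segs fs _ (fun x hx => hfs x (List.mem_cons_of_mem _ hx))]
    rfl

theorem dom_no_sentinel (parts : List String) (hdom : Dom_join_text_fragments parts) :
    ∀ g ∈ (parts.map String.toList).filter (· ≠ []), g ≠ [] ∧ '\x00' ∉ g := by
  intro g hg
  rw [List.mem_filter] at hg
  obtain ⟨hgm, hgn⟩ := hg
  refine ⟨by simpa using hgn, ?_⟩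
  obtain ⟨s, hs, rfl⟩ := List.mem_map.mp hgm
  intro hmem
  have hd := List.all_eq_true.mp hdom s hs
  have := List.all_eq_true.mp hd _ hmem
  simp [pvDomChar] at this

-- ===== VERDICT (by name: the statement is the Claim_ definition above) =====
theorem join_text_fragments_spec : Claim_equal_join_text_fragments := by
  intro parts hdom
  unfold Spec_join_text_fragments join_text_fragments join_text_fragments_alt
  have hns := dom_no_sentinel parts hdom
  cases hm : parts.map String.toList with
  | nil => simp [List.intercalate, scanB]
  | cons p rest =>
    rw [hm] at hns
    cases rest with
    | nil =>
      by_cases hp : p = []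
      · subst hp
        show String.ofList [] = _
        simp [List.intercalate, scanB]
      · have : ([p] : List (List Char)).filter (· ≠ []) = [p] := by simp [hp]
        rw [this] at hns ⊢
        rw [scanB_total [p] hns]
        simp [segs, joined]
    | cons q rest' =>
      by_cases hp : p = []
      · subst hp
        have hr : (([] : List Char) :: q :: rest').filter (· ≠ []) = (q :: rest').filter (· ≠ []) := by simp
        rw [hr] at hns ⊢
        show String.ofList ((joinA_loop [[]] (q :: rest')).reverse.flatten) = _
        rw [joinA_loop_nil_start, scanB_total _ hns]
        cases hf : (q :: rest').filter (· ≠ []) with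
        | nil =>
          simp only [joined, List.reverse_cons, List.reverse_nil, List.nil_append, List.flatten]
          rfl
        | cons f fs => simp [joined]
      · have hr : (p :: q :: rest').filter (· ≠ []) = p :: (q :: rest').filter (· ≠ []) := by
          simp [List.filter_cons, hp]
        rw [hr] at hns ⊢
        show String.ofList ((joinA_loop [p] (q :: rest')).reverse.flatten) = _
        rw [joinA_loop_eq _ _ _ hp, scanB_total _ hns]
        simp [joined]
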